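-- pv_equiv track=rewrite | github.com/Kris060991/Python | Python-Project1/3/task3.py | count_figures
-- ===== SOURCE A (Python) =====
-- def dfs(matrix, visited, i, j, component_info):
--     # Рекурсивный обход связанных единиц
--     if (i < 0 or i >= len(matrix) or j < 0 or j >= len(matrix[0]) or
--             visited[i][j] or matrix[i][j] == 0):
--         return
--
--     visited[i][j] = True
--     component_info['count'] += 1
--
--     # Обновляем границы компоненты
--     component_info['min_row'] = min(component_info['min_row'], i)
--     component_info['max_row'] = max(component_info['max_row'], i)
--     component_info['min_col'] = min(component_info['min_col'], j)
--     component_info['max_col'] = max(component_info['max_col'], j)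
--
--     # Рекурсивно обходим соседние клетки (4-связность)
--     dfs(matrix, visited, i + 1, j, component_info)
--     dfs(matrix, visited, i - 1, j, component_info)
--     dfs(matrix, visited, i, j + 1, component_info)
--     dfs(matrix, visited, i, j - 1, component_info)
--
-- def count_figures(matrix):
--     # Подсчет квадратов и кругов в матрице
--     if not matrix:
--         return 0, 0
--
--     n = len(matrix)
--     m = len(matrix[0])
--
--     visited = [[False for _ in range(m)] for _ in range(n)]
--     squares = 0
--     circles = 0
--
--     for i in range(n):
--         for j in range(m):
--             if matrix[i][j] == 1 and not visited[i][j]: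
--                 # Инициализируем информацию о компоненте
--                 component_info = {
--                     'count': 0,
--                     'min_row': i,
--                     'max_row': i,
--                     'min_col': j,
--                     'max_col': j
--                 }
--
--                 # Находим все связанные единицы
--                 dfs(matrix, visited, i, j, component_info)
--
--                 # Пропускаем компоненты из одной единицы
--                 if component_info['count'] <= 1:
--                     continue
--
--                 # Вычисляем размеры ограничивающего прямоугольника
--                 width = component_info['max_col'] - component_info['min_col'] + 1
--                 height = component_info['max_row'] - component_info['min_row'] + 1
--                 expected_area = width * height
--
--                 # Проверяем, является ли фигура квадратом
--                 if component_info['count'] == expected_area: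
--                     squares += 1
--                 else:
--                     circles += 1
--
--     return squares, circles
-- ===== SOURCE B (Python) =====
-- def count_figures(matrix):
--     # Iterative flood fill with an explicit stack; the component's cells are
--     # collected in a list and count / bounding box are computed from it at the end.
--     if not matrix:
--         return 0, 0
--
--     n = len(matrix)
--     m = len(matrix[0])
--
--     visited = [[False for _ in range(m)] for _ in range(n)]
--     squares = 0
--     circles = 0
--
--     for i in range(n):
--         for j in range(m):
--             if matrix[i][j] == 1 and not visited[i][j]:
--                 cells = []
--                 stack = [(i, j)]
--                 while stack:
--                     r, c = stack.pop()
--                     if (r < 0 or r >= n or c < 0 or c >= m or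
--                             visited[r][c] or matrix[r][c] == 0):
--                         continue
--                     visited[r][c] = True
--                     cells.append((r, c))
--                     stack += [(r, c - 1), (r, c + 1), (r - 1, c), (r + 1, c)]
--
--                 if len(cells) <= 1:
--                     continue
--
--                 rows = [r for r, _ in cells]
--                 cols = [c for _, c in cells]
--                 width = max(cols) - min(cols) + 1
--                 height = max(rows) - min(rows) + 1
--
--                 if len(cells) == width * height:
--                     squares += 1
--                 else:
--                     circles += 1
--
--     return squares, circles
-- ===== Notes on version B (the rewrite author's own statement) =====
-- stated objective: alternative
-- what changed: A's recursive DFS with a mutable component_info dict of running count/min/max is replaced by an explicit-stack flood fill that collects the component's cells in a list and computes the count and bounding box from that list afterwards.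
import Mathlib
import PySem

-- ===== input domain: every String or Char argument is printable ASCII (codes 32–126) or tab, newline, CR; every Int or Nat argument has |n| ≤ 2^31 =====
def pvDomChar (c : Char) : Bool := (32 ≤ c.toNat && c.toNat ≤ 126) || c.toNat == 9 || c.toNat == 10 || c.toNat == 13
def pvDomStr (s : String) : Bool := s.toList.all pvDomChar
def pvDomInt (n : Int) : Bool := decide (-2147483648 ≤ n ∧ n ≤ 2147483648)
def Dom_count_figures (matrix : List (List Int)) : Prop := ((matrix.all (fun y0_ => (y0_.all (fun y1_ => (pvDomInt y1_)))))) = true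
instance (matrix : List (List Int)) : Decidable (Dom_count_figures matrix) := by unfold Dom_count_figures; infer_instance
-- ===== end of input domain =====

-- B replaces A's recursive DFS (mutable component_info dict) by an explicit-stack flood
-- fill that collects the component's cells in a list and computes count/bounding box from
-- that list afterwards (objective: alternative; A and B mutate no caller-visible data).

-- ===== PORT A =====
-- shared low-level indexing helpers (visited[i][j], matrix[i][j]; out-of-range defaults
-- are unreachable in the reachable states of either port)
def pvGetB (v : List (List Bool)) (i j : Int) : Bool :=
  ((PySem.List.pyGet? v i).bind (fun row => PySem.List.pyGet? row j)).getD true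

def pvGetM (mtx : List (List Int)) (i j : Int) : Int :=
  ((PySem.List.pyGet? mtx i).bind (fun row => PySem.List.pyGet? row j)).getD 0

-- visited[i][j] = True
def pvMark (v : List (List Bool)) (i j : Int) : List (List Bool) :=
  PySem.List.pySetD v i (PySem.List.pySetD (PySem.List.pyGetD v i []) j true)

-- number of False entries of visited: the termination measure of the flood fills
def pvFalses (v : List (List Bool)) : Nat :=
  (v.map (fun row => row.countP (fun b => !b))).sum

-- the common skip guard of dfs (A) and of the while-loop body (B)
def pvGuard (mtx : List (List Int)) (v : List (List Bool)) (i j : Int) : Bool :=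
  decide (i < 0) || decide ((mtx.length : Int) ≤ i) || decide (j < 0) ||
    decide (((mtx.headD []).length : Int) ≤ j) || pvGetB v i j || (pvGetM mtx i j == 0)

structure PvInfo where
  count : Int
  minr : Int
  maxr : Int
  minc : Int
  maxc : Int
deriving DecidableEq, Repr

-- termination lemmas the ports cite in decreasing_by
theorem pvFalses_rowset (row : List Bool) (b : Nat) (h : row[b]? = some false) :
    (row.set b true).countP (fun x => !x) < row.countP (fun x => !x) := by
  induction row generalizing b with
  | nil => simp at h
  | cons x t ih =>
    cases b with
    | zero =>
      simp only [List.getElem?_cons_zero, Option.some.injEq] at h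
      subst h
      simp
    | succ b =>
      have := ih b (by simpa using h)
      simp only [List.set_cons_succ, List.countP_cons]
      omega

theorem pvFalses_set (v : List (List Bool)) (a : Nat) (row : List Bool) (b : Nat)
    (hv : v[a]? = some row) (hb : row[b]? = some false) :
    pvFalses (v.set a (row.set b true)) < pvFalses v := by
  induction v generalizing a with
  | nil => simp at hv
  | cons r t ih =>
    cases a with
    | zero =>
      simp only [List.getElem?_cons_zero, Option.some.injEq] at hv
      subst hv
      simp only [List.set_cons_zero, pvFalses, List.map_cons, List.sum_cons]
      exact Nat.add_lt_add_right (pvFalses_rowset _ _ hb) _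
    | succ a =>
      have := ih a (by simpa using hv)
      simp only [List.set_cons_succ, pvFalses, List.map_cons, List.sum_cons] at this ⊢
      omega

theorem pvGuard_eq_false (mtx : List (List Int)) (v : List (List Bool)) (i j : Int)
    (h : pvGuard mtx v i j = false) :
    0 ≤ i ∧ 0 ≤ j ∧ i < (mtx.length : Int) ∧ j < ((mtx.headD []).length : Int) ∧
    ((PySem.List.pyGet? v i).bind (fun row => PySem.List.pyGet? row j)) = some false ∧
    pvGetM mtx i j ≠ 0 := by
  simp only [pvGuard, Bool.or_eq_false_iff, decide_eq_false_iff_not, not_lt, not_le,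
    beq_eq_false_iff_ne] at h
  obtain ⟨⟨⟨⟨⟨h1, h2⟩, h3⟩, h4⟩, h5⟩, h6⟩ := h
  refine ⟨h1, h3, h2, h4, ?_, h6⟩
  unfold pvGetB at h5
  rcases hc : (PySem.List.pyGet? v i).bind (fun row => PySem.List.pyGet? row j) with _ | b
  · rw [hc] at h5; simp at h5
  · rw [hc] at h5; simp at h5; simp [h5]

theorem pvFalses_mark_lt (mtx : List (List Int)) (v : List (List Bool)) (i j : Int)
    (h : pvGuard mtx v i j = false) :
    pvFalses (pvMark v i j) < pvFalses v := by
  obtain ⟨hi, hj, _, _, hchain, _⟩ := pvGuard_eq_false mtx v i j h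
  rw [PySem.List.pyGet?_of_nonneg v hi] at hchain
  rcases hrow : v[i.toNat]? with _ | row
  · rw [hrow] at hchain; simp at hchain
  · rw [hrow] at hchain
    simp only [Option.bind_some] at hchain
    rw [PySem.List.pyGet?_of_nonneg row hj] at hchain
    obtain ⟨hlen, hget⟩ := List.getElem?_eq_some_iff.mp hrow
    have hcast : (i.toNat : Int) = i := Int.toNat_of_nonneg hi
    unfold pvMark
    rw [PySem.List.pySetD_of_nonneg _ _ hi, PySem.List.pySetD_of_nonneg _ _ hj]
    have hD : PySem.List.pyGetD v i [] = row := by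
      rw [PySem.List.pyGetD_eq_getElem v [] hi (by omega)]
      exact hget
    rw [hD]
    exact pvFalses_set v i.toNat row j.toNat hrow hchain

-- dfs of A: recursion on the number of unvisited cells; the subtype carries the
-- monotonicity fact the nested recursive calls need for termination
def dfsA (mtx : List (List Int)) (v : List (List Bool)) (i j : Int) (info : PvInfo) :
    {p : List (List Bool) × PvInfo // pvFalses p.1 ≤ pvFalses v} :=
  if hg : pvGuard mtx v i j = true then ⟨(v, info), Nat.le_refl _⟩
  else
    have hlt : pvFalses (pvMark v i j) < pvFalses v :=
      pvFalses_mark_lt mtx v i j (Bool.eq_false_iff.mpr hg)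
    match dfsA mtx (pvMark v i j) (i + 1) j
      ⟨info.count + 1, min info.minr i, max info.maxr i, min info.minc j, max info.maxc j⟩ with
    | ⟨p1, h1⟩ =>
      match dfsA mtx p1.1 (i - 1) j p1.2 with
      | ⟨p2, h2⟩ =>
        match dfsA mtx p2.1 i (j + 1) p2.2 with
        | ⟨p3, h3⟩ =>
          match dfsA mtx p3.1 i (j - 1) p3.2 with
          | ⟨p4, h4⟩ => ⟨p4, by omega⟩
termination_by pvFalses v
decreasing_by
  · exact hlt
  · omega
  · omega
  · omega

-- one cell of the double for-loop of A
def pvBodyA (mtx : List (List Int)) (st : List (List Bool) × Int × Int) (i j : Int) :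
    List (List Bool) × Int × Int :=
  if pvGetM mtx i j == 1 && !pvGetB st.1 i j then
    let r := (dfsA mtx st.1 i j ⟨0, i, i, j, j⟩).val
    if r.2.count ≤ 1 then (r.1, st.2.1, st.2.2)
    else
      let w := r.2.maxc - r.2.minc + 1
      let h := r.2.maxr - r.2.minr + 1
      if r.2.count == w * h then (r.1, st.2.1 + 1, st.2.2)
      else (r.1, st.2.1, st.2.2 + 1)
  else st

def count_figures (matrix : List (List Int)) : Int × Int :=
  if matrix = [] then (0, 0)
  else
    let n := matrix.length
    let m := (matrix.headD []).length
    let v0 : List (List Bool) := (List.range n).map (fun _ => List.replicate m false)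
    let res := ((List.range n).map Int.ofNat).foldl
      (fun st i => (((List.range m).map Int.ofNat).foldl
        (fun st2 j => pvBodyA matrix st2 i j) st))
      (v0, 0, 0)
    (res.2.1, res.2.2)

-- ===== PORT B =====
-- the while-loop of B: Python's append/pop-at-end stack is represented head-first
-- (push = cons, pop = head); pushes (c-1),(c+1),(r-1),(r+1) pop as (r+1),(r-1),(c+1),(c-1)
def runB (mtx : List (List Int)) (v : List (List Bool)) (cells : List (Int × Int))
    (stack : List (Int × Int)) : List (List Bool) × List (Int × Int) :=
  match stack with
  | [] => (v, cells)
  | (r, c) :: rest =>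
    if hg : pvGuard mtx v r c = true then runB mtx v cells rest
    else runB mtx (pvMark v r c) (cells ++ [(r, c)])
      ((r + 1, c) :: (r - 1, c) :: (r, c + 1) :: (r, c - 1) :: rest)
termination_by (pvFalses v, stack.length)
decreasing_by
  · exact Prod.Lex.right _ (by simp)
  · exact Prod.Lex.left _ _ (pvFalses_mark_lt mtx v r c (Bool.eq_false_iff.mpr hg))

-- one cell of the double for-loop of B
def pvBodyB (mtx : List (List Int)) (st : List (List Bool) × Int × Int) (i j : Int) :
    List (List Bool) × Int × Int :=
  if pvGetM mtx i j == 1 && !pvGetB st.1 i j then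
    let r := runB mtx st.1 [] [(i, j)]
    if r.2.length ≤ 1 then (r.1, st.2.1, st.2.2)
    else
      let cols := r.2.map Prod.snd
      let rows := r.2.map Prod.fst
      let w := (PySem.List.max? cols (fun x => x)).getD 0 - (PySem.List.min? cols (fun x => x)).getD 0 + 1
      let h := (PySem.List.max? rows (fun x => x)).getD 0 - (PySem.List.min? rows (fun x => x)).getD 0 + 1
      if ((r.2.length : Int)) == w * h then (r.1, st.2.1 + 1, st.2.2)
      else (r.1, st.2.1, st.2.2 + 1)
  else st

def count_figures_alt (matrix : List (List Int)) : Int × Int :=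
  if matrix = [] then (0, 0)
  else
    let n := matrix.length
    let m := (matrix.headD []).length
    let v0 : List (List Bool) := (List.range n).map (fun _ => List.replicate m false)
    let res := ((List.range n).map Int.ofNat).foldl
      (fun st i => (((List.range m).map Int.ofNat).foldl
        (fun st2 j => pvBodyB matrix st2 i j) st))
      (v0, 0, 0)
    (res.2.1, res.2.2)

-- ===== PRECONDITION & SPEC =====
-- Pre_ excludes ragged matrices with a row shorter than row 0: there the Python A (and B)
-- raise IndexError on matrix[i][j] in the scan loop.
def Pre_count_figures (matrix : List (List Int)) : Prop :=
  ∀ row ∈ matrix, (matrix.headD []).length ≤ row.length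
instance (matrix : List (List Int)) : Decidable (Pre_count_figures matrix) := by
  unfold Pre_count_figures; infer_instance

def pvWitness_count_figures : List (List Int) := [[1, 1, 0], [1, 1, 1], [0, 1, 0]]

def Spec_count_figures (matrix : List (List Int)) (out : Int × Int) : Prop := out = count_figures_alt matrix
instance (matrix : List (List Int)) (out : Int × Int) : Decidable (Spec_count_figures matrix out) := by unfold Spec_count_figures; infer_instance

-- ===== CLAIM (what is proved, stated in full; the proofs are below) =====
def Claim_equal_count_figures : Prop := ∀ (matrix : List (List Int)), Dom_count_figures matrix → Pre_count_figures matrix → Spec_count_figures matrix (count_figures matrix)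

-- ===== LEMMAS AND PROOFS =====

-- A's dfs threaded over a list of cells (the shape shared by both flood fills)
def pvFold (mtx : List (List Int)) (p : List (List Bool) × PvInfo) (l : List (Int × Int)) :
    List (List Bool) × PvInfo :=
  l.foldl (fun q cell => (dfsA mtx q.1 cell.1 cell.2 q.2).val) p

-- the invariant tying A's incremental component_info to B's cell list
def pvInv (info : PvInfo) (cells : List (Int × Int)) : Prop :=
  cells ≠ [] ∧
  info.count = (cells.length : Int) ∧
  PySem.List.min? (cells.map Prod.fst) (fun x => x) = some info.minr ∧
  PySem.List.max? (cells.map Prod.fst) (fun x => x) = some info.maxr ∧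
  PySem.List.min? (cells.map Prod.snd) (fun x => x) = some info.minc ∧
  PySem.List.max? (cells.map Prod.snd) (fun x => x) = some info.maxc

theorem pvMin?_append (xs : List Int) (a m : Int)
    (h : PySem.List.min? xs (fun x => x) = some m) :
    PySem.List.min? (xs ++ [a]) (fun x => x) = some (min m a) := by
  cases xs with
  | nil => have := PySem.List.min?_mem h; simp at this
  | cons x t =>
    rw [PySem.List.min?_id_cons] at h
    rw [List.cons_append, PySem.List.min?_id_cons, List.foldl_append]
    simp only [List.foldl_cons, List.foldl_nil]
    rw [(Option.some.injEq _ _).mp h]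

theorem pvMax?_append (xs : List Int) (a m : Int)
    (h : PySem.List.max? xs (fun x => x) = some m) :
    PySem.List.max? (xs ++ [a]) (fun x => x) = some (max m a) := by
  cases xs with
  | nil => have := PySem.List.max?_mem h; simp at this
  | cons x t =>
    rw [PySem.List.max?_id_cons] at h
    rw [List.cons_append, PySem.List.max?_id_cons, List.foldl_append]
    simp only [List.foldl_cons, List.foldl_nil]
    rw [(Option.some.injEq _ _).mp h]

theorem dfsA_skip (mtx : List (List Int)) (v : List (List Bool)) (i j : Int) (info : PvInfo)
    (hg : pvGuard mtx v i j = true) : (dfsA mtx v i j info).val = (v, info) := by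
  rw [dfsA.eq_def, dif_pos hg]

theorem dfsA_proc (mtx : List (List Int)) (v : List (List Bool)) (i j : Int) (info : PvInfo)
    (hg : pvGuard mtx v i j = false) :
    (dfsA mtx v i j info).val =
      pvFold mtx (pvMark v i j,
        ⟨info.count + 1, min info.minr i, max info.maxr i, min info.minc j, max info.maxc j⟩)
        [(i + 1, j), (i - 1, j), (i, j + 1), (i, j - 1)] := by
  rw [dfsA.eq_def, dif_neg (by simp [hg])]
  rfl

theorem runB_nil (mtx : List (List Int)) (v : List (List Bool)) (cells : List (Int × Int)) :
    runB mtx v cells [] = (v, cells) := by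
  rw [runB.eq_def]

theorem runB_skip (mtx : List (List Int)) (v : List (List Bool)) (cells : List (Int × Int))
    (r c : Int) (rest : List (Int × Int)) (hg : pvGuard mtx v r c = true) :
    runB mtx v cells ((r, c) :: rest) = runB mtx v cells rest := by
  rw [runB.eq_def]
  simp [hg]

theorem runB_proc (mtx : List (List Int)) (v : List (List Bool)) (cells : List (Int × Int))
    (r c : Int) (rest : List (Int × Int)) (hg : pvGuard mtx v r c = false) :
    runB mtx v cells ((r, c) :: rest) =
      runB mtx (pvMark v r c) (cells ++ [(r, c)])
        ((r + 1, c) :: (r - 1, c) :: (r, c + 1) :: (r, c - 1) :: rest) := by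
  rw [runB.eq_def]
  simp [hg]

-- the simulation: the stack machine of B is the dfs of A folded over the stack
theorem pvSim (mtx : List (List Int)) (v : List (List Bool)) (stack : List (Int × Int))
    (info : PvInfo) (cells : List (Int × Int)) (h : pvInv info cells) :
    (runB mtx v cells stack).1 = (pvFold mtx (v, info) stack).1 ∧
    pvInv (pvFold mtx (v, info) stack).2 (runB mtx v cells stack).2 := by
  match stack with
  | [] =>
    rw [runB_nil]
    exact ⟨rfl, h⟩
  | (r, c) :: rest =>
    by_cases hg : pvGuard mtx v r c = true
    · rw [runB_skip mtx v cells r c rest hg]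
      have hf : pvFold mtx (v, info) ((r, c) :: rest) = pvFold mtx (v, info) rest := by
        have h1 : pvFold mtx (v, info) ((r, c) :: rest) =
            pvFold mtx ((dfsA mtx v r c info).val) rest := rfl
        rw [h1, dfsA_skip mtx v r c info hg]
      rw [hf]
      exact pvSim mtx v rest info cells h
    · have hg' : pvGuard mtx v r c = false := Bool.eq_false_iff.mpr hg
      rw [runB_proc mtx v cells r c rest hg']
      have hf : pvFold mtx (v, info) ((r, c) :: rest) =
          pvFold mtx (pvMark v r c,
            ⟨info.count + 1, min info.minr r, max info.maxr r, min info.minc c, max info.maxc c⟩)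
            ([(r + 1, c), (r - 1, c), (r, c + 1), (r, c - 1)] ++ rest) := by
        have h1 : pvFold mtx (v, info) ((r, c) :: rest) =
            pvFold mtx ((dfsA mtx v r c info).val) rest := rfl
        rw [h1, dfsA_proc mtx v r c info hg']
        unfold pvFold
        rw [List.foldl_append]
      rw [hf]
      refine pvSim mtx (pvMark v r c) _ _ _ ?_
      obtain ⟨hne, hcount, hminr, hmaxr, hminc, hmaxc⟩ := h
      refine ⟨by simp, ?_, ?_, ?_, ?_, ?_⟩
      · simp only [List.length_append, List.length_cons, List.length_nil]
        rw [hcount]; push_cast; ring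
      · rw [List.map_append]
        exact pvMin?_append _ _ _ hminr
      · rw [List.map_append]
        exact pvMax?_append _ _ _ hmaxr
      · rw [List.map_append]
        exact pvMin?_append _ _ _ hminc
      · rw [List.map_append]
        exact pvMax?_append _ _ _ hmaxc
termination_by (pvFalses v, stack.length)
decreasing_by
  · exact Prod.Lex.right _ (by simp)
  · exact Prod.Lex.left _ _ (pvFalses_mark_lt mtx v r c (Bool.eq_false_iff.mpr hg))

theorem pvBody_eq (mtx : List (List Int)) (i j : Int)
    (hi0 : 0 ≤ i) (hin : i < (mtx.length : Int)) (hj0 : 0 ≤ j)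
    (hjm : j < ((mtx.headD []).length : Int)) (st : List (List Bool) × Int × Int) :
    pvBodyB mtx st i j = pvBodyA mtx st i j := by
  unfold pvBodyA pvBodyB
  by_cases hc : (pvGetM mtx i j == 1 && !pvGetB st.1 i j) = true
  · have hgm : pvGetM mtx i j = 1 := by
      have := (Bool.and_eq_true _ _).mp hc
      exact eq_of_beq this.1
    have hgb : pvGetB st.1 i j = false := by
      have := (Bool.and_eq_true _ _).mp hc
      simpa using this.2
    have hg : pvGuard mtx st.1 i j = false := by
      simp [pvGuard, hgb, hgm] at hjm hin ⊢
      omega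
    have hrun : runB mtx st.1 [] [(i, j)] =
        runB mtx (pvMark st.1 i j) [(i, j)] [(i + 1, j), (i - 1, j), (i, j + 1), (i, j - 1)] := by
      rw [runB_proc mtx st.1 [] i j [] hg]
      rfl
    have hproc := dfsA_proc mtx st.1 i j ⟨0, i, i, j, j⟩ hg
    simp only [min_self, max_self, zero_add] at hproc
    have hinv : pvInv ⟨1, i, i, j, j⟩ [(i, j)] := by
      refine ⟨by simp, by simp, ?_, ?_, ?_, ?_⟩ <;>
        simp [PySem.List.min?_id_cons, PySem.List.max?_id_cons]
    have hsim := pvSim mtx (pvMark st.1 i j)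
      [(i + 1, j), (i - 1, j), (i, j + 1), (i, j - 1)] ⟨1, i, i, j, j⟩ [(i, j)] hinv
    rw [← hproc] at hsim
    rw [← hrun] at hsim
    have hv := hsim.1
    obtain ⟨hne, hcount, hminr, hmaxr, hminc, hmaxc⟩ := hsim.2
    simp only [hc, if_true]
    simp only [hv, hcount, hminr, hmaxr, hminc, hmaxc, Option.getD_some]
    split_ifs <;> first | rfl | (exfalso; omega)
  · simp only [Bool.not_eq_true] at hc
    simp [hc]

-- ===== VERDICT (by name: the statement is the Claim_ definition above) =====
theorem count_figures_spec : Claim_equal_count_figures := by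
  intro matrix _ _
  unfold Spec_count_figures count_figures count_figures_alt
  by_cases hm : matrix = []
  · simp [hm]
  · simp only [hm, if_false]
    have H : List.foldl
        (fun st i => List.foldl (fun st2 j => pvBodyA matrix st2 i j) st
          (List.map Int.ofNat (List.range (matrix.headD []).length)))
        (List.map (fun x => List.replicate (matrix.headD []).length false)
          (List.range matrix.length), (0 : Int), (0 : Int))
        (List.map Int.ofNat (List.range matrix.length)) = List.foldl
        (fun st i => List.foldl (fun st2 j => pvBodyB matrix st2 i j) st
          (List.map Int.ofNat (List.range (matrix.headD []).length)))
        (List.map (fun x => List.replicate (matrix.headD []).length false)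
          (List.range matrix.length), (0 : Int), (0 : Int))
        (List.map Int.ofNat (List.range matrix.length)) := by
      apply PySem.List.foldl_congr_mem
      intro acc x hx
      apply PySem.List.foldl_congr_mem
      intro acc2 y hy
      simp only [List.mem_map, List.mem_range] at hx hy
      obtain ⟨k, hk, rfl⟩ := hx
      obtain ⟨l, hl, rfl⟩ := hy
      rw [Int.ofNat_eq_natCast]
      exact (pvBody_eq matrix (k : Int) (l : Int) (Int.natCast_nonneg k) (by exact_mod_cast hk)
        (Int.natCast_nonneg l) (by exact_mod_cast hl) acc2).symm
    rw [H]
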